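-- pv_equiv track=rewrite | github.com/AnaBeatriizOliveira/C-digos-FPC1 | lobomau.py | contar_sobreviventes
-- ===== SOURCE A (Python) =====
-- def encontrar_pasto(T, i, j, n, m):
--     if i < 0 or i >= n or j < 0 or j >= m:
--         return 0, 0
--     if T[i][j] == '#':
--         return 0, 0
--     ovelhas, lobos = 0, 0
--     if T[i][j] == 'k':
--         ovelhas = 1
--     elif T[i][j] == 'v':
--         lobos = 1
--     T[i][j] = '#'
--     for x, y in [(0, 1), (0, -1), (1, 0), (-1, 0)]:
--         o, l = encontrar_pasto(T, i + x, j + y, n, m)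
--         ovelhas += o
--         lobos += l
--     return ovelhas, lobos
--
-- def contar_sobreviventes(T):
--     n, m = len(T), len(T[0])
--     total_ovelhas, total_lobos = 0, 0
--     for i in range(n):
--         for j in range(m):
--             if T[i][j] in ('k', 'v'):
--                 ovelhas, lobos = encontrar_pasto(T, i, j, n, m)
--                 if ovelhas > lobos:
--                     total_ovelhas += ovelhas
--                 else:
--                     total_lobos += lobos
--     return total_ovelhas, total_lobos
-- ===== SOURCE B (Python) =====
-- def contar_sobreviventes(T):
--     n, m = len(T), len(T[0])
--     total_ovelhas, total_lobos = 0, 0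
--     for i in range(n):
--         for j in range(m):
--             if T[i][j] in ('k', 'v'):
--                 ovelhas, lobos = 0, 0
--                 stack = [(i, j)]
--                 while stack:
--                     a, b = stack.pop()
--                     if a < 0 or a >= n or b < 0 or b >= m or T[a][b] == '#':
--                         continue
--                     if T[a][b] == 'k':
--                         ovelhas += 1
--                     elif T[a][b] == 'v':
--                         lobos += 1
--                     T[a][b] = '#'
--                     stack.extend([(a - 1, b), (a + 1, b), (a, b - 1), (a, b + 1)])
--                 if ovelhas > lobos:
--                     total_ovelhas += ovelhas
--                 else:
--                     total_lobos += lobos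
--     return total_ovelhas, total_lobos
-- ===== Notes on version B (the rewrite author's own statement) =====
-- stated objective: alternative
-- what changed: The recursive four-neighbour flood fill helper is replaced by an iterative explicit-stack traversal that pops a cell, re-checks the bounds/'#' guard, counts and marks it, and pushes its neighbours; the outer scan and the tie-goes-to-wolves rule are unchanged.
import Mathlib
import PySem

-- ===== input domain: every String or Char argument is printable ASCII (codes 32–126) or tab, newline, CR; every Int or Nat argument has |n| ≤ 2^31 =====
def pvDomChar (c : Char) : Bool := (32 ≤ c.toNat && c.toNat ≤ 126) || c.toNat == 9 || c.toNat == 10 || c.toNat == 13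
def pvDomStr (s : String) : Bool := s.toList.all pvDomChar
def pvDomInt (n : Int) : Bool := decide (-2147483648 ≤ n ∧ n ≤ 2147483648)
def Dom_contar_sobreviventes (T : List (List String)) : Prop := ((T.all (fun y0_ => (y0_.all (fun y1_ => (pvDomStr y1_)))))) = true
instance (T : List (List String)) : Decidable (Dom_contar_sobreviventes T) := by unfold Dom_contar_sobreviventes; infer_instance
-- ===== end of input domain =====

-- B replaces the recursive flood-fill helper by an iterative explicit-stack traversal (same cost);
-- both Pythons mutate T in place identically (cells set to '#'); the equivalence proved is about the return value.


-- ===== shared grid primitives (used by both ports) =====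
-- getCell defaults to "#" out of range; inside Pre_ every access the guards allow is in range,
-- so the default is only reachable where the Python raises IndexError (outside Pre_).
def getCell (T : List (List String)) (i j : Int) : String :=
  (T.getD i.toNat []).getD j.toNat "#"

def setCell (T : List (List String)) (i j : Int) (v : String) : List (List String) :=
  T.set i.toNat ((T.getD i.toNat []).set j.toNat v)

-- number of cells ≠ "#": the termination measure of both flood fills
def nonHashRow (r : List String) : Nat := r.countP (fun s => !(s == "#"))
def nonHash (T : List (List String)) : Nat := (T.map nonHashRow).sum

lemma nonHashRow_set_lt (r : List String) (b : Nat) (h : r.getD b "#" ≠ "#") :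
    nonHashRow (r.set b "#") < nonHashRow r := by
  induction r generalizing b with
  | nil => simp at h
  | cons x xs ih =>
    cases b with
    | zero =>
      simp only [List.getD, List.getElem?_cons_zero, Option.getD_some] at h
      simp only [List.set_cons_zero, nonHashRow, List.countP_cons]
      simp [h]
    | succ b =>
      have := ih b (by simpa [List.getD] using h)
      simp only [List.set_cons_succ, nonHashRow, List.countP_cons] at this ⊢
      omega

lemma nonHash_set_lt (T : List (List String)) (a b : Nat)
    (h : (T.getD a []).getD b "#" ≠ "#") :
    nonHash (T.set a ((T.getD a []).set b "#")) < nonHash T := by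
  induction T generalizing a with
  | nil => simp at h
  | cons r rs ih =>
    cases a with
    | zero =>
      simp only [List.getD, List.getElem?_cons_zero] at h
      have := nonHashRow_set_lt r b (by simpa using h)
      simp [nonHash, List.getD]
      omega
    | succ a =>
      have := ih a (by simpa [List.getD] using h)
      simp [nonHash, List.getD] at this ⊢
      omega

lemma getCell_set_lt (T : List (List String)) (i j : Int) (h : getCell T i j ≠ "#") :
    nonHash (setCell T i j "#") < nonHash T :=
  nonHash_set_lt T i.toNat j.toNat h

-- ===== PORT A =====
-- encontrar_pasto: the recursion is literal; the Python 'for x, y in [(0,1),(0,-1),(1,0),(-1,0)]'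
-- loop over the four literal offsets is unrolled, threading T through the four calls in the same
-- order.  The subtype result carries the invariant nonHash ≤ (needed only for termination).
def epAuxP (T : List (List String)) (i j n m : Int) :
    {r : Int × Int × List (List String) // nonHash r.2.2 ≤ nonHash T} :=
  if i < 0 ∨ n ≤ i ∨ j < 0 ∨ m ≤ j then ⟨(0, 0, T), le_rfl⟩
  else if hc : getCell T i j = "#" then ⟨(0, 0, T), le_rfl⟩
  else
    let ov : Int := if getCell T i j = "k" then 1 else 0
    let lo : Int := if getCell T i j = "v" then 1 else 0
    have h0 : nonHash (setCell T i j "#") < nonHash T := getCell_set_lt T i j hc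
    match epAuxP (setCell T i j "#") i (j + 1) n m with
    | ⟨(o1, l1, T1), p1⟩ =>
      match epAuxP T1 i (j - 1) n m with
      | ⟨(o2, l2, T2), p2⟩ =>
        match epAuxP T2 (i + 1) j n m with
        | ⟨(o3, l3, T3), p3⟩ =>
          match epAuxP T3 (i - 1) j n m with
          | ⟨(o4, l4, T4), p4⟩ =>
            ⟨(ov + o1 + o2 + o3 + o4, lo + l1 + l2 + l3 + l4, T4),
              le_trans p4 (le_trans p3 (le_trans p2 (le_trans p1 h0.le)))⟩
termination_by nonHash T
decreasing_by
  · exact h0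
  · exact lt_of_le_of_lt p1 h0
  · exact lt_of_le_of_lt (le_trans p2 p1) h0
  · exact lt_of_le_of_lt (le_trans p3 (le_trans p2 p1)) h0

def encontrar_pasto (T : List (List String)) (i j n m : Int) :
    Int × Int × List (List String) :=
  (epAuxP T i j n m).val

-- the body of A's outer double loop for one cell (i, j); state = (total_ovelhas, total_lobos, T)
def cellA (n m : Int) (st : Int × Int × List (List String)) (i j : Int) :
    Int × Int × List (List String) :=
  if getCell st.2.2 i j = "k" ∨ getCell st.2.2 i j = "v" then
    let r := encontrar_pasto st.2.2 i j n m
    if r.2.1 < r.1 then (st.1 + r.1, st.2.1, r.2.2) else (st.1, st.2.1 + r.2.1, r.2.2)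
  else st

def contar_sobreviventes (T : List (List String)) : Int × Int :=
  let n : Int := T.length
  let m : Int := (T.headD []).length
  let r := (PySem.List.pyRange 0 n 1).foldl
    (fun st i => (PySem.List.pyRange 0 m 1).foldl (fun st j => cellA n m st i j) st)
    (0, 0, T)
  (r.1, r.2.1)

-- ===== PORT B =====
-- the while-stack loop; Python's list with .pop()/.extend from the end is the Lean list with its
-- head as the top of the stack, so extending with [(a-1,b),(a+1,b),(a,b-1),(a,b+1)] and popping
-- the end is pushing (a,b+1),(a,b-1),(a+1,b),(a-1,b) on the front.
def stackLoop (n m : Int) (stack : List (Int × Int)) (T : List (List String))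
    (ov lo : Int) : Int × Int × List (List String) :=
  match stack with
  | [] => (ov, lo, T)
  | (a, b) :: rest =>
    if h : a < 0 ∨ n ≤ a ∨ b < 0 ∨ m ≤ b ∨ getCell T a b = "#" then
      stackLoop n m rest T ov lo
    else
      let ov' := if getCell T a b = "k" then ov + 1 else ov
      let lo' := if getCell T a b = "v" then lo + 1 else lo
      stackLoop n m ((a, b + 1) :: (a, b - 1) :: (a + 1, b) :: (a - 1, b) :: rest)
        (setCell T a b "#") ov' lo'
termination_by (nonHash T, stack.length)
decreasing_by
  · exact Prod.Lex.right _ (by simp)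
  · exact Prod.Lex.left _ _ (getCell_set_lt T a b (by tauto))

-- the body of B's outer double loop for one cell (i, j)
def cellB (n m : Int) (st : Int × Int × List (List String)) (i j : Int) :
    Int × Int × List (List String) :=
  if getCell st.2.2 i j = "k" ∨ getCell st.2.2 i j = "v" then
    let r := stackLoop n m [(i, j)] st.2.2 0 0
    if r.2.1 < r.1 then (st.1 + r.1, st.2.1, r.2.2) else (st.1, st.2.1 + r.2.1, r.2.2)
  else st

def contar_sobreviventes_alt (T : List (List String)) : Int × Int :=
  let n : Int := T.length
  let m : Int := (T.headD []).length
  let r := (PySem.List.pyRange 0 n 1).foldl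
    (fun st i => (PySem.List.pyRange 0 m 1).foldl (fun st j => cellB n m st i j) st)
    (0, 0, T)
  (r.1, r.2.1)

-- ===== PRECONDITION & SPEC =====
-- Python raises IndexError when the table is empty (len(T[0])) and when some row is shorter
-- than the first row (T[i][j] with j < m); Pre_ excludes exactly those inputs.
def Pre_contar_sobreviventes (T : List (List String)) : Prop :=
  T ≠ [] ∧ ∀ r ∈ T, (T.headD []).length ≤ r.length
instance (T : List (List String)) : Decidable (Pre_contar_sobreviventes T) := by
  unfold Pre_contar_sobreviventes; infer_instance
def pvWitness_contar_sobreviventes : List (List String) :=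
  [["k", "v", "."], [".", "k", "#"]]

def Spec_contar_sobreviventes (T : List (List String)) (out : Int × Int) : Prop := out = contar_sobreviventes_alt T
instance (T : List (List String)) (out : Int × Int) : Decidable (Spec_contar_sobreviventes T out) := by unfold Spec_contar_sobreviventes; infer_instance

-- ===== CLAIM (what is proved, stated in full; the proofs are below) =====
def Claim_equal_contar_sobreviventes : Prop := ∀ (T : List (List String)), Dom_contar_sobreviventes T → Pre_contar_sobreviventes T → Spec_contar_sobreviventes T (contar_sobreviventes T)

-- ===== LEMMAS AND PROOFS =====

lemma stackLoop_arg_congr (n m : Int) (cs : List (Int × Int)) (T : List (List String))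
    {x x' y y' : Int} (hx : x = x') (hy : y = y') :
    stackLoop n m cs T x y = stackLoop n m cs T x' y' := by rw [hx, hy]

-- unfolding lemmas for encontrar_pasto (= (epAuxP …).val), stated on the plain triple
lemma ep_out (T : List (List String)) (i j n m : Int)
    (hg : i < 0 ∨ n ≤ i ∨ j < 0 ∨ m ≤ j) :
    encontrar_pasto T i j n m = (0, 0, T) := by
  unfold encontrar_pasto; rw [epAuxP, if_pos hg]

lemma ep_hash (T : List (List String)) (i j n m : Int)
    (hg : ¬ (i < 0 ∨ n ≤ i ∨ j < 0 ∨ m ≤ j)) (hc : getCell T i j = "#") :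
    encontrar_pasto T i j n m = (0, 0, T) := by
  unfold encontrar_pasto; rw [epAuxP, if_neg hg, dif_pos hc]

lemma ep_mark (T : List (List String)) (i j n m : Int)
    (hg : ¬ (i < 0 ∨ n ≤ i ∨ j < 0 ∨ m ≤ j)) (hc : ¬ getCell T i j = "#") :
    encontrar_pasto T i j n m =
      ((if getCell T i j = "k" then 1 else 0) +
         (encontrar_pasto (setCell T i j "#") i (j + 1) n m).1 +
         (encontrar_pasto (encontrar_pasto (setCell T i j "#") i (j + 1) n m).2.2 i (j - 1) n m).1 +
         (encontrar_pasto (encontrar_pasto (encontrar_pasto (setCell T i j "#") i (j + 1) n m).2.2 i (j - 1) n m).2.2 (i + 1) j n m).1 +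
         (encontrar_pasto (encontrar_pasto (encontrar_pasto (encontrar_pasto (setCell T i j "#") i (j + 1) n m).2.2 i (j - 1) n m).2.2 (i + 1) j n m).2.2 (i - 1) j n m).1,
       (if getCell T i j = "v" then 1 else 0) +
         (encontrar_pasto (setCell T i j "#") i (j + 1) n m).2.1 +
         (encontrar_pasto (encontrar_pasto (setCell T i j "#") i (j + 1) n m).2.2 i (j - 1) n m).2.1 +
         (encontrar_pasto (encontrar_pasto (encontrar_pasto (setCell T i j "#") i (j + 1) n m).2.2 i (j - 1) n m).2.2 (i + 1) j n m).2.1 +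
         (encontrar_pasto (encontrar_pasto (encontrar_pasto (encontrar_pasto (setCell T i j "#") i (j + 1) n m).2.2 i (j - 1) n m).2.2 (i + 1) j n m).2.2 (i - 1) j n m).2.1,
       (encontrar_pasto (encontrar_pasto (encontrar_pasto (encontrar_pasto (setCell T i j "#") i (j + 1) n m).2.2 i (j - 1) n m).2.2 (i + 1) j n m).2.2 (i - 1) j n m).2.2) := by
  unfold encontrar_pasto
  conv_lhs => rw [epAuxP]
  rw [if_neg hg, dif_neg hc]

lemma ep_nonHash_le (T : List (List String)) (i j n m : Int) :
    nonHash (encontrar_pasto T i j n m).2.2 ≤ nonHash T :=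
  (epAuxP T i j n m).property


-- the simulation: one stacked cell is processed exactly as one recursive call of A's helper
lemma stackLoop_sim (n m : Int) :
    ∀ (N : Nat) (T : List (List String)), nonHash T ≤ N →
    ∀ (i j : Int) (cs : List (Int × Int)) (o l : Int),
    stackLoop n m ((i, j) :: cs) T o l =
      stackLoop n m cs (encontrar_pasto T i j n m).2.2
        (o + (encontrar_pasto T i j n m).1) (l + (encontrar_pasto T i j n m).2.1) := by
  intro N
  induction N using Nat.strong_induction_on with
  | _ N IH =>
    intro T hT i j cs o l
    rw [stackLoop]
    by_cases hg : i < 0 ∨ n ≤ i ∨ j < 0 ∨ m ≤ j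
    · rw [ep_out T i j n m hg, dif_pos (by tauto)]
      simp
    · by_cases hc : getCell T i j = "#"
      · rw [ep_hash T i j n m hg hc, dif_pos (by tauto)]
        simp
      · have hguard : ¬ (i < 0 ∨ n ≤ i ∨ j < 0 ∨ m ≤ j ∨ getCell T i j = "#") := by tauto
        rw [dif_neg hguard, ep_mark T i j n m hg hc]
        have h0 := getCell_set_lt T i j hc
        have hN : nonHash (setCell T i j "#") < N := lt_of_lt_of_le h0 hT
        have b1 := ep_nonHash_le (setCell T i j "#") i (j + 1) n m
        rcases hr1 : encontrar_pasto (setCell T i j "#") i (j + 1) n m with ⟨o1, l1, T1⟩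
        rw [hr1] at b1; dsimp only at b1 ⊢
        have b2 := ep_nonHash_le T1 i (j - 1) n m
        rcases hr2 : encontrar_pasto T1 i (j - 1) n m with ⟨o2, l2, T2⟩
        rw [hr2] at b2; dsimp only at b2 ⊢
        have b3 := ep_nonHash_le T2 (i + 1) j n m
        rcases hr3 : encontrar_pasto T2 (i + 1) j n m with ⟨o3, l3, T3⟩
        rw [hr3] at b3; dsimp only at b3 ⊢
        have b4 := ep_nonHash_le T3 (i - 1) j n m
        rcases hr4 : encontrar_pasto T3 (i - 1) j n m with ⟨o4, l4, T4⟩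
        rw [hr4] at b4; dsimp only at b4 ⊢
        rw [IH _ hN _ le_rfl, hr1]; dsimp only
        rw [IH _ hN _ b1, hr2]; dsimp only
        rw [IH _ hN _ (le_trans b2 b1), hr3]; dsimp only
        rw [IH _ hN _ (le_trans b3 (le_trans b2 b1)), hr4]; dsimp only
        by_cases hk : getCell T i j = "k" <;> by_cases hv : getCell T i j = "v" <;>
          simp only [hk, hv, String.reduceEq, reduceIte] <;>
          (apply stackLoop_arg_congr <;> ring)

lemma cellA_eq_cellB (n m : Int) (st : Int × Int × List (List String)) (i j : Int) :
    cellA n m st i j = cellB n m st i j := by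
  unfold cellA cellB
  have h := stackLoop_sim n m (nonHash st.2.2) st.2.2 le_rfl i j [] 0 0
  rw [stackLoop] at h
  simp only [zero_add] at h
  rw [h]

-- ===== VERDICT (by name: the statement is the Claim_ definition above) =====
theorem contar_sobreviventes_spec : Claim_equal_contar_sobreviventes := by
  intro T _ _
  unfold Spec_contar_sobreviventes contar_sobreviventes contar_sobreviventes_alt
  simp only [funext fun st => funext fun i' => funext fun j' =>
    cellA_eq_cellB (T.length : Int) ((T.headD []).length : Int) st i' j']
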